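-- pv_equiv track=rewrite | github.com/gabrielg2020/codeowners | src/modules/coCreator/coCreator.py | create_codeowners_files
-- ===== SOURCE A (Python) =====
-- def create_codeowners_files(developers: dict, repos: list) -> dict:
--   """Returns a repo_codeowners_map from a developer dictionary."""
--   repo_developer_map = {}
--   for developer in developers:
--     current_repo = developer['current_repo']
--     if current_repo in repo_developer_map:
--       repo_developer_map[current_repo].append(developer['acc_name'])
--     else:
--       repo_developer_map[current_repo] = [developer['acc_name']]
--
--   repo_codeowners_map = {}
--   for repo in repos:
--     codeowners_string = '# This file shows that '
--     if repo in repo_developer_map: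
--       owners = repo_developer_map[repo]
--       if owners:
--         owners_str = " and ".join("@" + owner for owner in owners)
--         codeowners_string += f'{owners_str} own the {repo} repository. \n * {" ".join("@" + owner for owner in owners)}'
--       else:
--         codeowners_string += f'nobody owns the {repo} repository. '
--     else:
--       codeowners_string += f'nobody owns the {repo} repository.'
--
--     repo_codeowners_map[repo] = codeowners_string
--
--
--   return repo_codeowners_map
-- ===== SOURCE B (Python) =====
-- def create_codeowners_files(developers: dict, repos: list) -> dict:
--   """Returns a repo_codeowners_map from a developer dictionary."""
--   result = {}
--   for repo in repos:
--     owners = [d['acc_name'] for d in developers if d['current_repo'] == repo]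
--     if owners:
--       tagged = ['@' + o for o in owners]
--       result[repo] = ('# This file shows that ' + ' and '.join(tagged)
--                       + f' own the {repo} repository. \n * ' + ' '.join(tagged))
--     else:
--       result[repo] = f'# This file shows that nobody owns the {repo} repository.'
--   return result
-- ===== Notes on version B (the rewrite author's own statement) =====
-- stated objective: simpler
-- what changed: B drops A's grouping pre-pass (the repo->owners dict) and instead, for each repo, collects its owners with one direct comprehension over developers, formatting the line immediately; A's unreachable trailing-space empty-owners branch disappears.
import Mathlib
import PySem

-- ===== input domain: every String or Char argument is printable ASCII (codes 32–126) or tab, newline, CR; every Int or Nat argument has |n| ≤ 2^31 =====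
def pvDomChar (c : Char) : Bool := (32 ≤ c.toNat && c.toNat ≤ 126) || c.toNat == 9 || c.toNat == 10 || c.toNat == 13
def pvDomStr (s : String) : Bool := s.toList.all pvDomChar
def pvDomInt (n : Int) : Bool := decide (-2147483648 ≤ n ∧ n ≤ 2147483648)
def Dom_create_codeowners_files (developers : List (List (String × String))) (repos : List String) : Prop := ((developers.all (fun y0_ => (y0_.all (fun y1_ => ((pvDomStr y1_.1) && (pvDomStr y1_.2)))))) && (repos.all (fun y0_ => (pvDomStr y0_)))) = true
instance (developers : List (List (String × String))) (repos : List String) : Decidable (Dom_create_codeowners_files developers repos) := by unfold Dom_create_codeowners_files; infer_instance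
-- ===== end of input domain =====

-- B replaces A's dict-building pre-pass by a per-repo scan of developers (simpler, no index);
-- return values proved equal on Pre_ (every developer has both keys); no argument is mutated.

-- ===== PORT A =====
-- one step of A's first loop: group acc_name under current_repo
def pvAStep (m : PySem.Dict String (List String)) (developer : List (String × String)) :
    PySem.Dict String (List String) :=
  let current_repo := (PySem.Dict.mk developer).getD "current_repo" ""
  let acc_name := (PySem.Dict.mk developer).getD "acc_name" ""
  if m.contains current_repo then
    m.insert current_repo (m.getD current_repo [] ++ [acc_name])
  else
    m.insert current_repo [acc_name]

def create_codeowners_files (developers : List (List (String × String))) (repos : List String) :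
    List (String × String) :=
  let repo_developer_map : PySem.Dict String (List String) :=
    developers.foldl pvAStep PySem.Dict.empty
  let repo_codeowners_map : PySem.Dict String String :=
    repos.foldl (fun rcm repo =>
      let codeowners_string := "# This file shows that "
      let codeowners_string :=
        match repo_developer_map.get? repo with   -- 'if repo in map' + 'map[repo]'
        | some owners =>
          if owners ≠ [] then
            codeowners_string ++ PySem.Str.join " and " (owners.map (fun owner => "@" ++ owner))
              ++ " own the " ++ repo ++ " repository. \n * "
              ++ PySem.Str.join " " (owners.map (fun owner => "@" ++ owner))
          else
            codeowners_string ++ "nobody owns the " ++ repo ++ " repository. "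
        | none => codeowners_string ++ "nobody owns the " ++ repo ++ " repository."
      rcm.insert repo codeowners_string) PySem.Dict.empty
  repo_codeowners_map.items

-- ===== PORT B =====
def create_codeowners_files_alt (developers : List (List (String × String))) (repos : List String) :
    List (String × String) :=
  (repos.foldl (fun result repo =>
    let owners :=
      (developers.filter (fun d => (PySem.Dict.mk d).getD "current_repo" "" == repo)).map
        (fun d => (PySem.Dict.mk d).getD "acc_name" "")
    let s :=
      if owners ≠ [] then
        let tagged := owners.map (fun o => "@" ++ o)
        "# This file shows that " ++ PySem.Str.join " and " tagged
          ++ " own the " ++ repo ++ " repository. \n * " ++ PySem.Str.join " " tagged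
      else
        "# This file shows that nobody owns the " ++ repo ++ " repository."
    result.insert repo s) PySem.Dict.empty).items

-- ===== PRECONDITION & SPEC =====
-- Pre_ excludes exactly the inputs where A raises KeyError: a developer dict missing
-- 'current_repo' or 'acc_name'.
def Pre_create_codeowners_files (developers : List (List (String × String))) (repos : List String) : Prop :=
  developers.all (fun dev =>
    (PySem.Dict.mk dev).contains "current_repo" && (PySem.Dict.mk dev).contains "acc_name") = true
instance (developers : List (List (String × String))) (repos : List String) :
    Decidable (Pre_create_codeowners_files developers repos) := by
  unfold Pre_create_codeowners_files; infer_instance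

def pvWitness_create_codeowners_files : (List (List (String × String))) × List String :=
  ([[("current_repo", "r1"), ("acc_name", "alice")], [("current_repo", "r1"), ("acc_name", "bob")]], ["r1", "r2"])

def Spec_create_codeowners_files (developers : List (List (String × String))) (repos : List String) (out : List (String × String)) : Prop := out = create_codeowners_files_alt developers repos
instance (developers : List (List (String × String))) (repos : List String) (out : List (String × String)) : Decidable (Spec_create_codeowners_files developers repos out) := by unfold Spec_create_codeowners_files; infer_instance

-- ===== CLAIM (what is proved, stated in full; the proofs are below) =====
def Claim_equal_create_codeowners_files : Prop := ∀ (developers : List (List (String × String))) (repos : List String), Dom_create_codeowners_files developers repos → Pre_create_codeowners_files developers repos → Spec_create_codeowners_files developers repos (create_codeowners_files developers repos)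

-- ===== LEMMAS AND PROOFS =====

-- the 'current_repo' / 'acc_name' fields a developer dict carries (lookup with default, as the ports do)
def pvCR (dev : List (String × String)) : String := (PySem.Dict.mk dev).getD "current_repo" ""
def pvAN (dev : List (String × String)) : String := (PySem.Dict.mk dev).getD "acc_name" ""

-- the owners B collects for a repo
def pvOwners (developers : List (List (String × String))) (repo : String) : List String :=
  (developers.filter (fun d => pvCR d == repo)).map pvAN

lemma pvAStep_eq_modify (m : PySem.Dict String (List String)) (dev : List (String × String)) :
    pvAStep m dev = m.modify (pvCR dev) [] (· ++ [pvAN dev]) := by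
  show (if m.contains (pvCR dev) then m.insert (pvCR dev) (m.getD (pvCR dev) [] ++ [pvAN dev])
      else m.insert (pvCR dev) [pvAN dev]) = m.modify (pvCR dev) [] (· ++ [pvAN dev])
  have hm : m.modify (pvCR dev) [] (· ++ [pvAN dev])
      = m.insert (pvCR dev) (m.getD (pvCR dev) [] ++ [pvAN dev]) := by
    simp [PySem.Dict.modify, PySem.Dict.insert, PySem.Dict.getD]
  by_cases h : m.contains (pvCR dev) = true
  · rw [if_pos h, hm]
  · rw [if_neg (by simpa using h), hm,
      show m.getD (pvCR dev) [] = [] from PySem.Dict.getD_of_not_contains m [] (by simpa using h)]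
    rfl

lemma pvAFold_eq_modify (developers : List (List (String × String))) :
    developers.foldl pvAStep PySem.Dict.empty
      = developers.foldl (fun m dev => m.modify (pvCR dev) [] (· ++ [pvAN dev])) PySem.Dict.empty := by
  congr 1
  funext m dev
  exact pvAStep_eq_modify m dev

lemma pvAMap_getD (developers : List (List (String × String))) (repo : String) :
    (developers.foldl pvAStep PySem.Dict.empty).getD repo [] = pvOwners developers repo := by
  rw [pvAFold_eq_modify,
    show developers.foldl (fun m dev => m.modify (pvCR dev) [] (· ++ [pvAN dev])) PySem.Dict.empty
        = (developers.map (fun dev => (pvCR dev, pvAN dev))).foldl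
            (fun (m : PySem.Dict String (List String)) (p : String × String) => m.modify p.1 [] (· ++ [p.2])) PySem.Dict.empty
      from (List.foldl_map (f := fun dev => (pvCR dev, pvAN dev))
        (g := fun (m : PySem.Dict String (List String)) (p : String × String) => m.modify p.1 [] (· ++ [p.2]))).symm]
  rw [PySem.Dict.getD_foldl_modify_append]
  simp [pvOwners, List.filter_map, Function.comp_def, List.map_map]

lemma pvAMap_contains (developers : List (List (String × String))) (repo : String) :
    ((developers.foldl pvAStep PySem.Dict.empty).contains repo = true)
      ↔ repo ∈ developers.map pvCR := by
  rw [pvAFold_eq_modify, PySem.Dict.contains_iff_mem_keys,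
    PySem.Dict.keys_foldl_modify_key developers pvCR [] (fun m dev => (· ++ [pvAN dev])) _]
  simp [pysem, eq_comm]

lemma pvOwners_eq_nil_iff (developers : List (List (String × String))) (repo : String) :
    pvOwners developers repo = [] ↔ ¬ repo ∈ developers.map pvCR := by
  unfold pvOwners
  rw [List.map_eq_nil_iff, List.filter_eq_nil_iff]
  simp only [List.mem_map, not_exists, beq_iff_eq, not_and]

lemma pvAMap_get? (developers : List (List (String × String))) (repo : String) :
    (developers.foldl pvAStep PySem.Dict.empty).get? repo =
      if pvOwners developers repo = [] then none else some (pvOwners developers repo) := by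
  by_cases h : pvOwners developers repo = []
  · rw [if_pos h]
    have hc : (developers.foldl pvAStep PySem.Dict.empty).contains repo = false := by
      have hmem := (pvOwners_eq_nil_iff developers repo).1 h
      have := (pvAMap_contains developers repo).not.2 hmem
      simpa using this
    exact (PySem.Dict.get?_eq_none_iff_contains _ repo).2 hc
  · rw [if_neg h]
    have hc : (developers.foldl pvAStep PySem.Dict.empty).contains repo = true :=
      (pvAMap_contains developers repo).2 (by
        by_contra hmem
        exact h ((pvOwners_eq_nil_iff developers repo).2 hmem))
    have hs : ((developers.foldl pvAStep PySem.Dict.empty).get? repo).isSome = true := by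
      rw [← PySem.Dict.contains_eq_isSome_get?]; exact hc
    obtain ⟨v, hv⟩ := Option.isSome_iff_exists.1 hs
    have h2 := pvAMap_getD developers repo
    rw [PySem.Dict.getD_eq_get?_getD, hv] at h2
    simp only [Option.getD_some] at h2
    rw [hv, h2]

-- ===== VERDICT (by name: the statement is the Claim_ definition above) =====
theorem create_codeowners_files_spec : Claim_equal_create_codeowners_files := by
  intro developers repos _ _
  unfold Spec_create_codeowners_files create_codeowners_files create_codeowners_files_alt
  refine congrArg PySem.Dict.items ?_
  refine List.foldl_ext _ _ _ ?_
  intro rcm repo _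
  refine congrArg (fun s => rcm.insert repo s) ?_
  simp only []
  rw [pvAMap_get? developers repo]
  by_cases h : pvOwners developers repo = []
  · rw [if_pos h]
    have h' : (developers.filter (fun d => (PySem.Dict.mk d).getD "current_repo" "" == repo)).map
        (fun d => (PySem.Dict.mk d).getD "acc_name" "") = [] := h
    rw [h']
    simp only [ne_eq, not_true_eq_false, if_false,
      show "# This file shows that " ++ "nobody owns the " = "# This file shows that nobody owns the " from rfl]
  · rw [if_neg h]
    have h2 : ¬ List.map (fun d => (PySem.Dict.mk d).getD "acc_name" "")
        (List.filter (fun d => (PySem.Dict.mk d).getD "current_repo" "" == repo) developers) = [] := h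
    simp only [ne_eq, h, h2, not_false_eq_true, if_true]
    rfl
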